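-- pv_equiv track=rewrite | github.com/Ag3497120/verantyx-v6 | synth_results/2013d3e2.py | transform
-- ===== SOURCE A (Python) =====
-- from collections import Counter
--
-- def transform(grid):
--     grid = [row[:] for row in grid]
--     h, w = len(grid), len(grid[0])
--
--     # Find the most common non-zero color (background)
--     all_vals = [grid[i][j] for i in range(h) for j in range(w) if grid[i][j] not in [0, 2]]
--     if not all_vals:
--         return grid
--
--     bg_color = Counter(all_vals).most_common(1)[0][0]
--
--     # Find all positions with 2s
--     twos = [(i, j) for i in range(h) for j in range(w) if grid[i][j] == 2]
--     if not twos: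
--         return grid
--
--     # For each group of 2s, find bounding box
--     visited = set()
--
--     def get_connected_twos(sr, sc):
--         stack = [(sr, sc)]
--         component = []
--         while stack:
--             r, c = stack.pop()
--             if (r, c) in visited or r < 0 or r >= h or c < 0 or c >= w:
--                 continue
--             if grid[r][c] != 2:
--                 continue
--             visited.add((r, c))
--             component.append((r, c))
--             for dr, dc in [(-1, 0), (1, 0), (0, -1), (0, 1)]:
--                 stack.append((r + dr, c + dc))
--         return component
--
--     for sr, sc in twos:
--         if (sr, sc) in visited:
--             continue
--
--         component = get_connected_twos(sr, sc)
--         if not component: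
--             continue
--
--         # Find bounding box
--         min_r = min(r for r, c in component)
--         max_r = max(r for r, c in component)
--         min_c = min(c for r, c in component)
--         max_c = max(c for r, c in component)
--
--         # Replace background color with 4 in bounding box
--         for r in range(min_r, max_r + 1):
--             for c in range(min_c, max_c + 1):
--                 if grid[r][c] == bg_color:
--                     grid[r][c] = 4
--
--     return grid
-- ===== SOURCE B (Python) =====
-- from collections import Counter
--
-- def _component(grid, h, w, sr, sc):
--     """All 2-cells 4-connected to (sr, sc), found with a FIFO queue (BFS)."""
--     seen = set()
--     comp = []
--     queue = [(sr, sc)]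
--     while queue:
--         r, c = queue.pop(0)
--         if (r, c) in seen or not (0 <= r < h and 0 <= c < w) or grid[r][c] != 2:
--             continue
--         seen.add((r, c))
--         comp.append((r, c))
--         queue += [(r - 1, c), (r + 1, c), (r, c - 1), (r, c + 1)]
--     return comp
--
-- def transform(grid):
--     h, w = len(grid), len(grid[0])
--     vals = [v for row in grid for v in row[:w] if v not in (0, 2)]
--     if not vals:
--         return [row[:] for row in grid]
--     bg = Counter(vals).most_common(1)[0][0]
--     twos = [(i, j) for i in range(h) for j in range(w) if grid[i][j] == 2]
--     if not twos:
--         return [row[:] for row in grid]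
--     boxes = set()
--     for (si, sj) in twos:
--         comp = _component(grid, h, w, si, sj)
--         rs = [r for r, _ in comp]
--         cs = [c for _, c in comp]
--         boxes.add((min(rs), max(rs), min(cs), max(cs)))
--     return [[4 if v == bg and any(r0 <= i <= r1 and c0 <= j <= c1
--                                   for (r0, r1, c0, c1) in boxes) else v
--              for j, v in enumerate(row)]
--             for i, row in enumerate(grid)]
-- ===== Notes on version B (the rewrite author's own statement) =====
-- stated objective: alternative
-- what changed: A mutates a grid copy in place, flood-filling each new 2-component with a shared-visited LIFO DFS and painting bounding boxes sequentially into the evolving grid; B instead computes every 2-cell's component with an independent FIFO BFS over the original grid, collects the distinct bounding boxes in a set, and rebuilds the grid functionally in one per-cell pass testing membership in any box.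
import Mathlib
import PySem

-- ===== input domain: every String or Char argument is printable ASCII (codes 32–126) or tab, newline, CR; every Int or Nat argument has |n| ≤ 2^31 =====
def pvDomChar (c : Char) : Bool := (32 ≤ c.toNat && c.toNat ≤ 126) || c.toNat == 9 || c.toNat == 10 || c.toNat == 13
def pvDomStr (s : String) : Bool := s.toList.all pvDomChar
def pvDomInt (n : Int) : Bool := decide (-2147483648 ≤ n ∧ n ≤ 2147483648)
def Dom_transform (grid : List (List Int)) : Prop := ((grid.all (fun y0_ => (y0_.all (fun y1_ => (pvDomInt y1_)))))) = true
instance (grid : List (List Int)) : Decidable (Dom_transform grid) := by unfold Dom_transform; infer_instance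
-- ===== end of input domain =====

-- B replaces A's in-place DFS flood fill + sequential bounding-box mutation by a per-cell BFS
-- (fresh FIFO queue per 2-cell), a set of bounding boxes, and a purely functional per-cell rebuild
-- of the grid ('alternative' objective, not claimed faster).

-- ===== shared small helpers (Python primitives) =====
-- grid[r][c] (all uses in both ports are guarded in range, where pyGetD is exact)
def pvGet (g : List (List Int)) (r c : Int) : Int :=
  PySem.List.pyGetD (PySem.List.pyGetD g r []) c 0

-- grid[r][c] = v (all uses are in range, where pySetD is exact)
def pvSet (g : List (List Int)) (r c : Int) (v : Int) : List (List Int) :=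
  PySem.List.pySetD g r (PySem.List.pySetD (PySem.List.pyGetD g r []) c v)

-- Counter(xs): dict value -> count, keys in first-occurrence order (Python dict semantics)
def pvCounter (xs : List Int) : PySem.Dict Int Int :=
  xs.foldl (fun d v => PySem.Dict.insert d v (PySem.Dict.getD d v 0 + 1)) PySem.Dict.empty

-- Counter(xs).most_common(1)[0][0]: first key attaining the maximal count
-- (most_common sorts by count, descending and stable, so ties go to the earliest key)
def pvMostCommon1 (xs : List Int) : Int :=
  match (pvCounter xs).items with
  | [] => 0  -- unreachable: both callers guard xs ≠ []
  | kc :: rest => (rest.foldl (fun best kc' => if kc'.2 > best.2 then kc' else best) kc).1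

-- ===== PORT A =====
-- get_connected_twos: DFS with an explicit stack (pop from the END), shared `visited`,
-- reading the CURRENT (partially filled) grid.  Fuel 5*h*w+1 dominates the loop measure
-- 5*|unvisited 2-cells| + |stack| (each iteration pops one entry; a visit adds 4 entries
-- but permanently visits one cell), so it never runs out.
def pvDfsA (g : List (List Int)) (h w : Int) :
    Nat → List (Int × Int) → List (Int × Int) → List (Int × Int) →
    List (Int × Int) × List (Int × Int)
  | 0, vis, _, comp => (comp, vis)
  | f + 1, vis, stack, comp =>
    match stack.getLast? with
    | none => (comp, vis)
    | some (r, c) =>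
      let rest := stack.dropLast
      if (r, c) ∈ vis ∨ r < 0 ∨ r ≥ h ∨ c < 0 ∨ c ≥ w then
        pvDfsA g h w f vis rest comp
      else if pvGet g r c ≠ 2 then
        pvDfsA g h w f vis rest comp
      else
        pvDfsA g h w f ((r, c) :: vis)
          (rest ++ [(r - 1, c), (r + 1, c), (r, c - 1), (r, c + 1)])
          (comp ++ [(r, c)])

def transform (grid : List (List Int)) : List (List Int) :=
  let g0 := grid.map (fun row => PySem.List.slice row none none)   -- [row[:] for row in grid]
  let h : Int := PySem.List.len g0
  let w : Int := PySem.List.len (PySem.List.pyGetD g0 0 [])        -- len(grid[0]); Pre_ excludes []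
  let all_vals := (PySem.List.pyRange 0 h 1).flatMap (fun i =>
    ((PySem.List.pyRange 0 w 1).map (fun j => pvGet g0 i j)).filter
      (fun v => !(v == 0 || v == 2)))
  if all_vals = [] then g0 else
  let bg := pvMostCommon1 all_vals
  let twos := (PySem.List.pyRange 0 h 1).flatMap (fun i =>
    ((PySem.List.pyRange 0 w 1).filter (fun j => pvGet g0 i j == 2)).map (fun j => (i, j)))
  if twos = [] then g0 else
  let res := twos.foldl (fun (st : List (List Int) × List (Int × Int)) s =>
    if s ∈ st.2 then st else
    let cv := pvDfsA st.1 h w (5 * (h.toNat * w.toNat) + 1) st.2 [s] []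
    if cv.1 = [] then (st.1, cv.2) else
    let min_r := ((cv.1.map Prod.fst).min?).getD 0
    let max_r := ((cv.1.map Prod.fst).max?).getD 0
    let min_c := ((cv.1.map Prod.snd).min?).getD 0
    let max_c := ((cv.1.map Prod.snd).max?).getD 0
    let g' := (PySem.List.pyRange min_r (max_r + 1) 1).foldl (fun g r =>
      (PySem.List.pyRange min_c (max_c + 1) 1).foldl (fun g c =>
        if pvGet g r c = bg then pvSet g r c 4 else g) g) st.1
    (g', cv.2)) (g0, [])
  res.1

-- ===== PORT B =====
-- _component: BFS with a FIFO queue (pop from the FRONT), fresh `seen` per start,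
-- reading the ORIGINAL grid; returns the component list.  Same fuel bound as above.
def pvBfsB (g : List (List Int)) (h w : Int) :
    Nat → List (Int × Int) → List (Int × Int) → List (Int × Int) → List (Int × Int)
  | 0, _, _, comp => comp
  | f + 1, seen, queue, comp =>
    match queue with
    | [] => comp
    | (r, c) :: qrest =>
      if (r, c) ∈ seen ∨ ¬(0 ≤ r ∧ r < h ∧ 0 ≤ c ∧ c < w) ∨ pvGet g r c ≠ 2 then
        pvBfsB g h w f seen qrest comp
      else
        pvBfsB g h w f ((r, c) :: seen)
          (qrest ++ [(r - 1, c), (r + 1, c), (r, c - 1), (r, c + 1)])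
          (comp ++ [(r, c)])

def transform_alt (grid : List (List Int)) : List (List Int) :=
  let h : Int := PySem.List.len grid
  let w : Int := PySem.List.len (PySem.List.pyGetD grid 0 [])
  let vals := grid.flatMap (fun row =>
    (PySem.List.slice row none (some w)).filter (fun v => !(v == 0 || v == 2)))
  if vals = [] then grid.map (fun row => PySem.List.slice row none none) else
  let bg := pvMostCommon1 vals
  let twos := (PySem.List.pyRange 0 h 1).flatMap (fun i =>
    ((PySem.List.pyRange 0 w 1).filter (fun j => pvGet grid i j == 2)).map (fun j => (i, j)))
  if twos = [] then grid.map (fun row => PySem.List.slice row none none) else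
  let boxes : PySem.Set (Int × Int × Int × Int) := twos.foldl (fun bs s =>
    let comp := pvBfsB grid h w (5 * (h.toNat * w.toNat) + 1) [] [s] []
    let rs := comp.map Prod.fst
    let cs := comp.map Prod.snd
    PySem.Set.add bs ((rs.min?).getD 0, (rs.max?).getD 0, (cs.min?).getD 0, (cs.max?).getD 0))
    PySem.Set.empty
  (PySem.List.enumerate grid).map (fun iv =>
    (PySem.List.enumerate iv.2).map (fun jv =>
      if jv.2 == bg && boxes.any (fun b =>
          b.1 ≤ iv.1 && iv.1 ≤ b.2.1 && b.2.2.1 ≤ jv.1 && jv.1 ≤ b.2.2.2)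
      then 4 else jv.2))

-- ===== PRECONDITION & SPEC =====
-- Pre_ excludes exactly the inputs where Python A raises IndexError: the empty grid
-- (grid[0]) and grids having a row shorter than the first row (grid[i][j], j < len(grid[0])).
def Pre_transform (grid : List (List Int)) : Prop :=
  grid ≠ [] ∧ ∀ row ∈ grid, (grid.headI).length ≤ row.length
instance (grid : List (List Int)) : Decidable (Pre_transform grid) := by
  unfold Pre_transform; infer_instance

def pvWitness_transform : List (List Int) := [[2, 1, 0], [0, 1, 2], [1, 1, 1]]

def Spec_transform (grid : List (List Int)) (out : List (List Int)) : Prop := out = transform_alt grid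
instance (grid : List (List Int)) (out : List (List Int)) : Decidable (Spec_transform grid out) := by unfold Spec_transform; infer_instance

-- ===== CLAIM (what is proved, stated in full; the proofs are below) =====
def Claim_equal_transform : Prop := ∀ (grid : List (List Int)), Dom_transform grid → Pre_transform grid → Spec_transform grid (transform grid)


-- ===== LEMMAS AND PROOFS =====

-- ---------- generic worklist machinery ----------
-- the four Python neighbours [(r-1,c),(r+1,c),(r,c-1),(r,c+1)]
def pvNbs (p : Int × Int) : List (Int × Int) :=
  [(p.1 - 1, p.2), (p.1 + 1, p.2), (p.1, p.2 - 1), (p.1, p.2 + 1)]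

-- 'live' cell: in bounds and currently holding a 2
def pvOk (g : List (List Int)) (h w : Int) (p : Int × Int) : Bool :=
  decide (0 ≤ p.1 ∧ p.1 < h ∧ 0 ≤ p.2 ∧ p.2 < w ∧ pvGet g p.1 p.2 = 2)

def pvR (ok : Int × Int → Bool) (p q : Int × Int) : Prop :=
  ok p = true ∧ ok q = true ∧ q ∈ pvNbs p

def pvReach (ok : Int × Int → Bool) (S : List (Int × Int)) (x : Int × Int) : Prop :=
  ∃ s ∈ S, ok s = true ∧ Relation.ReflTransGen (pvR ok) s x

-- both flood fills are instances of this worklist loop, for different pop policies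
def pvWl (ok : Int × Int → Bool)
    (pop : List (Int × Int) → Option ((Int × Int) × List (Int × Int))) :
    Nat → List (Int × Int) → List (Int × Int) → List (Int × Int) →
    List (Int × Int) × List (Int × Int)
  | 0, vis, _, comp => (comp, vis)
  | f + 1, vis, stk, comp =>
    match pop stk with
    | none => (comp, vis)
    | some (p, rest) =>
      if p ∈ vis ∨ ok p = false then pvWl ok pop f vis rest comp
      else pvWl ok pop f (p :: vis) (rest ++ pvNbs p) (comp ++ [p])

lemma pvNbs_symm (p q : Int × Int) : q ∈ pvNbs p ↔ p ∈ pvNbs q := by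
  rcases p with ⟨a, b⟩; rcases q with ⟨c, d⟩
  simp [pvNbs, Prod.ext_iff]; omega

lemma pvR_symm {ok p q} (h : pvR ok p q) : pvR ok q p :=
  ⟨h.2.1, h.1, (pvNbs_symm q p).mpr h.2.2⟩

lemma pvRtg_symm {ok p q} (h : Relation.ReflTransGen (pvR ok) p q) :
    Relation.ReflTransGen (pvR ok) q p := by
  induction h with
  | refl => exact .refl
  | tail _ h2 ih => exact Relation.ReflTransGen.head (pvR_symm h2) ih

lemma pvRtg_ok_right {ok p q} (hp : ok p = true)
    (h : Relation.ReflTransGen (pvR ok) p q) : ok q = true := by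
  induction h with
  | refl => exact hp
  | tail _ h2 _ => exact h2.2.1

lemma pvEscape {ok} (vis stk : List (Int × Int))
    (hinv : ∀ p ∈ vis, ∀ q, pvR ok p q → q ∈ vis ∨ q ∈ stk)
    {a x : Int × Int} (hax : Relation.ReflTransGen (pvR ok) a x) (ha : a ∈ vis) :
    x ∈ vis ∨ pvReach ok stk x := by
  revert ha
  induction hax using Relation.ReflTransGen.head_induction_on with
  | refl => exact fun hx => Or.inl hx
  | head hr htail ih =>
    rename_i a' b
    intro ha
    rcases hinv _ ha _ hr with hb | hb
    · exact ih hb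
    · exact Or.inr ⟨b, hb, hr.2.1, htail⟩

lemma pvWl_spec (ok : Int × Int → Bool)
    (pop : List (Int × Int) → Option ((Int × Int) × List (Int × Int)))
    (F : Finset (Int × Int)) (hF : ∀ p, ok p = true → p ∈ F)
    (hpop : ∀ l p rest, pop l = some (p, rest) → l.Perm (p :: rest))
    (hnone : ∀ l, pop l = none → l = []) :
    ∀ (f : Nat) (vis stk comp : List (Int × Int)),
    (∀ p ∈ vis, ∀ q, pvR ok p q → q ∈ vis ∨ q ∈ stk) →
    5 * (F.filter (fun p => p ∉ vis)).card + stk.length ≤ f →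
    (∀ x, x ∈ (pvWl ok pop f vis stk comp).2 ↔ x ∈ vis ∨ pvReach ok stk x) ∧
    (∀ x, x ∈ (pvWl ok pop f vis stk comp).1 ↔
      x ∈ comp ∨ (x ∉ vis ∧ pvReach ok stk x)) := by
  intro f
  induction f with
  | zero =>
    intro vis stk comp hinv hfuel
    have hstk : stk = [] := by
      cases stk with
      | nil => rfl
      | cons a l => simp at hfuel
    subst hstk
    constructor <;> intro x <;> simp [pvWl, pvReach]
  | succ f ih =>
    intro vis stk comp hinv hfuel
    cases hp : pop stk with
    | none =>
      have hstk := hnone _ hp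
      subst hstk
      constructor <;> intro x <;> simp [pvWl, hp, pvReach]
    | some pr =>
      obtain ⟨p, rest⟩ := pr
      have hperm := hpop _ _ _ hp
      have hlen : stk.length = rest.length + 1 := by simpa using hperm.length_eq
      have hmemstk : ∀ x, x ∈ stk ↔ x = p ∨ x ∈ rest := by
        intro x; rw [hperm.mem_iff]; simp
      have hpstk : p ∈ stk := (hmemstk p).2 (Or.inl rfl)
      by_cases hcond : p ∈ vis ∨ ok p = false
      · -- skipped entry
        have hinv' : ∀ p' ∈ vis, ∀ q, pvR ok p' q → q ∈ vis ∨ q ∈ rest := by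
          intro p' hp' q hR
          rcases hinv p' hp' q hR with h | h
          · exact Or.inl h
          · rcases (hmemstk q).1 h with rfl | h2
            · rcases hcond with h3 | h3
              · exact Or.inl h3
              · rw [hR.2.1] at h3; cases h3
            · exact Or.inr h2
        have hreach_iff : ∀ x, (x ∈ vis ∨ pvReach ok rest x) ↔ (x ∈ vis ∨ pvReach ok stk x) := by
          intro x
          constructor
          · rintro (h | ⟨s, hs, hoks, hrtg⟩)
            · exact Or.inl h
            · exact Or.inr ⟨s, (hmemstk s).2 (Or.inr hs), hoks, hrtg⟩
          · rintro (h | ⟨s, hs, hoks, hrtg⟩)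
            · exact Or.inl h
            · rcases (hmemstk s).1 hs with rfl | h2
              · rcases hcond with h3 | h3
                · exact pvEscape vis rest hinv' hrtg h3
                · rw [hoks] at h3; cases h3
              · exact Or.inr ⟨s, h2, hoks, hrtg⟩
        have hstep : pvWl ok pop (f + 1) vis stk comp = pvWl ok pop f vis rest comp := by
          simp [pvWl, hp, hcond]
        have hfuel' : 5 * (F.filter (fun p => p ∉ vis)).card + rest.length ≤ f := by omega
        obtain ⟨H2, H1⟩ := ih vis rest comp hinv' hfuel'
        rw [hstep]
        refine ⟨fun x => ?_, fun x => ?_⟩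
        · rw [H2 x, hreach_iff]
        · rw [H1 x]
          constructor
          · rintro (h | ⟨hnv, hr⟩)
            · exact Or.inl h
            · exact Or.inr ⟨hnv, ((hreach_iff x).1 (Or.inr hr)).resolve_left hnv⟩
          · rintro (h | ⟨hnv, hr⟩)
            · exact Or.inl h
            · exact Or.inr ⟨hnv, ((hreach_iff x).2 (Or.inr hr)).resolve_left hnv⟩
      · -- fresh live cell: visit it
        push Not at hcond
        obtain ⟨hpv, hok'⟩ := hcond
        have hokp : ok p = true := by
          cases hq : ok p
          · exact absurd hq hok'
          · rfl
        have hinv' : ∀ p' ∈ p :: vis, ∀ q, pvR ok p' q → q ∈ p :: vis ∨ q ∈ rest ++ pvNbs p := by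
          intro p' hp' q hR
          rcases List.mem_cons.1 hp' with rfl | hp'
          · exact Or.inr (List.mem_append.2 (Or.inr hR.2.2))
          · rcases hinv p' hp' q hR with h | h
            · exact Or.inl (List.mem_cons.2 (Or.inr h))
            · rcases (hmemstk q).1 h with rfl | h2
              · exact Or.inl (List.mem_cons_self ..)
              · exact Or.inr (List.mem_append.2 (Or.inl h2))
        have hpF : p ∈ F.filter (fun q => q ∉ vis) := Finset.mem_filter.2 ⟨hF p hokp, hpv⟩
        have hcard : (F.filter (fun q => q ∉ p :: vis)).card + 1 = (F.filter (fun q => q ∉ vis)).card := by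
          have he : F.filter (fun q => q ∉ p :: vis) = (F.filter (fun q => q ∉ vis)).erase p := by
            ext q
            simp only [Finset.mem_filter, Finset.mem_erase, List.mem_cons]
            tauto
          rw [he, Finset.card_erase_of_mem hpF]
          have hpos : 0 < (F.filter (fun q => q ∉ vis)).card := Finset.card_pos.2 ⟨p, hpF⟩
          omega
        have hlen4 : (rest ++ pvNbs p).length = rest.length + 4 := by simp [pvNbs]
        have hfuel' : 5 * (F.filter (fun q => q ∉ p :: vis)).card + (rest ++ pvNbs p).length ≤ f := by
          rw [hlen4]; omega
        have hreach_iff : ∀ x, (x ∈ p :: vis ∨ pvReach ok (rest ++ pvNbs p) x) ↔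
            (x ∈ vis ∨ pvReach ok stk x) := by
          intro x
          constructor
          · rintro (hx | ⟨s, hs, hoks, hrtg⟩)
            · rcases List.mem_cons.1 hx with rfl | hx
              · exact Or.inr ⟨x, hpstk, hokp, .refl⟩
              · exact Or.inl hx
            · rcases List.mem_append.1 hs with hs | hs
              · exact Or.inr ⟨s, (hmemstk s).2 (Or.inr hs), hoks, hrtg⟩
              · exact Or.inr ⟨p, hpstk, hokp,
                  Relation.ReflTransGen.head ⟨hokp, hoks, hs⟩ hrtg⟩
          · rintro (hx | ⟨s, hs, hoks, hrtg⟩)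
            · exact Or.inl (List.mem_cons.2 (Or.inr hx))
            · rcases (hmemstk s).1 hs with rfl | h2
              · rcases Relation.ReflTransGen.cases_head hrtg with rfl | ⟨b, hRb, hbx⟩
                · exact Or.inl (List.mem_cons_self ..)
                · exact Or.inr ⟨b, List.mem_append.2 (Or.inr hRb.2.2), hRb.2.1, hbx⟩
              · exact Or.inr ⟨s, List.mem_append.2 (Or.inl h2), hoks, hrtg⟩
        have hstep : pvWl ok pop (f + 1) vis stk comp =
            pvWl ok pop f (p :: vis) (rest ++ pvNbs p) (comp ++ [p]) := by
          have : ¬(p ∈ vis ∨ ok p = false) := by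
            push Not
            exact ⟨hpv, hok'⟩
          simp [pvWl, hp, this]
        obtain ⟨H2, H1⟩ := ih (p :: vis) (rest ++ pvNbs p) (comp ++ [p]) hinv' hfuel'
        rw [hstep]
        refine ⟨fun x => ?_, fun x => ?_⟩
        · rw [H2 x, hreach_iff]
        · rw [H1 x]
          constructor
          · rintro (hx | ⟨hnv, hr⟩)
            · rcases List.mem_append.1 hx with hx | hx
              · exact Or.inl hx
              · have hxp : x = p := by simpa using hx
                subst hxp
                exact Or.inr ⟨hpv, x, hpstk, hokp, .refl⟩
            · have := ((hreach_iff x).1 (Or.inr hr))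
              have hxv : x ∉ vis := fun hxv => hnv (List.mem_cons.2 (Or.inr hxv))
              exact Or.inr ⟨hxv, this.resolve_left hxv⟩
          · rintro (hx | ⟨hnv, hr⟩)
            · exact Or.inl (List.mem_append.2 (Or.inl hx))
            · by_cases hxp : x = p
              · subst hxp
                exact Or.inl (List.mem_append.2 (Or.inr (by simp)))
              · have hnv' : x ∉ p :: vis := by
                  simp only [List.mem_cons]
                  push Not
                  exact ⟨hxp, hnv⟩
                exact Or.inr ⟨hnv', ((hreach_iff x).2 (Or.inr hr)).resolve_left hnv'⟩

-- ---------- the two flood fills are worklist instances ----------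
lemma pvDfsA_eq (g : List (List Int)) (h w : Int) :
    ∀ (f : Nat) (vis stk comp : List (Int × Int)),
    pvDfsA g h w f vis stk comp =
      pvWl (pvOk g h w) (fun l => l.getLast?.map (fun p => (p, l.dropLast))) f vis stk comp := by
  intro f
  induction f with
  | zero => intro vis stk comp; rfl
  | succ f ih =>
    intro vis stk comp
    cases hl : stk.getLast? with
    | none => simp [pvDfsA, pvWl, hl]
    | some p =>
      obtain ⟨r, c⟩ := p
      by_cases hv : ((r, c) ∈ vis ∨ r < 0 ∨ r ≥ h ∨ c < 0 ∨ c ≥ w)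
      · have hw : (r, c) ∈ vis ∨ pvOk g h w (r, c) = false := by
          rcases hv with h1 | h1
          · exact Or.inl h1
          · refine Or.inr ?_
            simp only [pvOk, decide_eq_false_iff_not]
            intro ⟨a1, a2, a3, a4, _⟩
            rcases h1 with h1 | h1 | h1 | h1 <;> omega
        simp only [pvDfsA, pvWl, hl, Option.map_some, if_pos hv, if_pos hw]
        exact ih ..
      · push Not at hv
        obtain ⟨h1, h2, h3, h4, h5⟩ := hv
        by_cases h6 : pvGet g r c = 2
        · have hw : ¬((r, c) ∈ vis ∨ pvOk g h w (r, c) = false) := by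
            push Not
            refine ⟨h1, ?_⟩
            simp only [pvOk, ne_eq, decide_eq_false_iff_not, not_not]
            exact ⟨h2, by omega, h4, by omega, h6⟩
          have hv' : ¬((r, c) ∈ vis ∨ r < 0 ∨ r ≥ h ∨ c < 0 ∨ c ≥ w) := by
            push Not
            exact ⟨h1, h2, by omega, h4, by omega⟩
          simp only [pvDfsA, pvWl, hl, Option.map_some, if_neg hv',
            if_neg (show ¬pvGet g r c ≠ 2 by simp [h6]), if_neg hw, pvNbs]
          exact ih ..
        · have hw : (r, c) ∈ vis ∨ pvOk g h w (r, c) = false := by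
            refine Or.inr ?_
            simp only [pvOk, decide_eq_false_iff_not]
            intro ⟨_, _, _, _, a5⟩
            exact h6 a5
          have hv' : ¬((r, c) ∈ vis ∨ r < 0 ∨ r ≥ h ∨ c < 0 ∨ c ≥ w) := by
            push Not
            exact ⟨h1, h2, by omega, h4, by omega⟩
          simp only [pvDfsA, pvWl, hl, Option.map_some, if_neg hv', if_pos h6, if_pos hw]
          exact ih ..

lemma pvBfsB_eq (g : List (List Int)) (h w : Int) :
    ∀ (f : Nat) (seen queue comp : List (Int × Int)),
    pvBfsB g h w f seen queue comp =
      (pvWl (pvOk g h w) (fun l => match l with | [] => none | x :: xs => some (x, xs))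
        f seen queue comp).1 := by
  intro f
  induction f with
  | zero => intro seen queue comp; rfl
  | succ f ih =>
    intro seen queue comp
    cases queue with
    | nil => rfl
    | cons p qrest =>
      obtain ⟨r, c⟩ := p
      by_cases hv : ((r, c) ∈ seen ∨ ¬(0 ≤ r ∧ r < h ∧ 0 ≤ c ∧ c < w) ∨ pvGet g r c ≠ 2)
      · have hw : (r, c) ∈ seen ∨ pvOk g h w (r, c) = false := by
          rcases hv with h1 | h1 | h1
          · exact Or.inl h1
          · refine Or.inr ?_
            simp only [pvOk, decide_eq_false_iff_not]
            intro ⟨a1, a2, a3, a4, _⟩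
            exact h1 ⟨a1, a2, a3, a4⟩
          · refine Or.inr ?_
            simp only [pvOk, decide_eq_false_iff_not]
            intro ⟨_, _, _, _, a5⟩
            exact h1 a5
        simp only [pvBfsB, pvWl, if_pos hv, if_pos hw]
        exact ih ..
      · push Not at hv
        obtain ⟨h1, h2, h3⟩ := hv
        have hw : ¬((r, c) ∈ seen ∨ pvOk g h w (r, c) = false) := by
          push Not
          refine ⟨h1, ?_⟩
          simp only [pvOk, ne_eq, decide_eq_false_iff_not, not_not]
          exact ⟨h2.1, h2.2.1, h2.2.2.1, h2.2.2.2, h3⟩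
        have hv' : ¬((r, c) ∈ seen ∨ ¬(0 ≤ r ∧ r < h ∧ 0 ≤ c ∧ c < w) ∨ pvGet g r c ≠ 2) := by
          push Not
          exact ⟨h1, h2, h3⟩
        simp only [pvBfsB, pvWl, if_neg hv', if_neg hw, pvNbs]
        exact ih ..

lemma pvPopLast_perm : ∀ (l : List (Int × Int)) p rest,
    l.getLast?.map (fun p => (p, l.dropLast)) = some (p, rest) → l.Perm (p :: rest) := by
  intro l p rest hm
  cases hl : l.getLast? with
  | none => rw [hl] at hm; cases hm
  | some q =>
    rw [hl] at hm
    simp only [Option.map_some, Option.some.injEq, Prod.mk.injEq] at hm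
    obtain ⟨rfl, rfl⟩ := hm
    have hne : l ≠ [] := by
      intro h; subst h; simp at hl
    have hq : l.getLast hne = q := by
      rw [← Option.some_inj, ← List.getLast?_eq_some_getLast hne, hl]
    have h2 : l.dropLast ++ [q] = l := by
      rw [← hq]
      exact List.dropLast_append_getLast hne
    have h3 := List.perm_append_singleton q l.dropLast
    rwa [h2] at h3

lemma pvPopLast_none : ∀ (l : List (Int × Int)),
    l.getLast?.map (fun p => (p, l.dropLast)) = none → l = [] := by
  intro l hm
  cases l with
  | nil => rfl
  | cons a t => simp [List.getLast?_cons] at hm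

-- ---------- pointwise grid access ----------
def pvGetN (g : List (List Int)) (i j : Nat) : Int := (g.getD i []).getD j 0

def pvShape (g g' : List (List Int)) : Prop :=
  g'.length = g.length ∧ ∀ k : Nat, (g'.getD k []).length = (g.getD k []).length

lemma pvShape_refl (g : List (List Int)) : pvShape g g := ⟨rfl, fun _ => rfl⟩

lemma pvShape_trans {a b c} (h1 : pvShape a b) (h2 : pvShape b c) : pvShape a c :=
  ⟨h2.1.trans h1.1, fun k => (h2.2 k).trans (h1.2 k)⟩

lemma pyGetD_nonneg {α : Type} (xs : List α) {i : Int} (hi : 0 ≤ i) (d : α) :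
    PySem.List.pyGetD xs i d = xs.getD i.toNat d := by
  have h2 : (i.toNat : Int) = i := Int.toNat_of_nonneg hi
  rw [← h2, PySem.List.pyGetD_natCast, Int.toNat_natCast]

lemma pvGet_nonneg (g : List (List Int)) {i j : Int} (hi : 0 ≤ i) (hj : 0 ≤ j) :
    pvGet g i j = pvGetN g i.toNat j.toNat := by
  rw [pvGet, pvGetN, pyGetD_nonneg g hi, pyGetD_nonneg _ hj]

lemma pvGetD_set {α : Type} (l : List α) (n : Nat) (a : α) (i : Nat) (d : α) :
    (l.set n a).getD i d = if i = n ∧ n < l.length then a else l.getD i d := by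
  by_cases h1 : i = n
  · subst h1
    by_cases h2 : i < l.length
    · simp [List.getD_eq_getElem?_getD, h2]
    · have h3 : l[i]? = none := by
        rw [List.getElem?_eq_none_iff]; omega
      simp [List.getD_eq_getElem?_getD, h2]
  · simp [List.getD_eq_getElem?_getD, Ne.symm h1, h1]

lemma pvGetN_pvSet (g : List (List Int)) {r c : Int} (hr : 0 ≤ r) (hc : 0 ≤ c)
    (v : Int) (i j : Nat) :
    pvGetN (pvSet g r c v) i j =
      if i = r.toNat ∧ j = c.toNat ∧ r.toNat < g.length ∧ c.toNat < (g.getD r.toNat []).length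
      then v else pvGetN g i j := by
  unfold pvSet pvGetN
  rw [PySem.List.pySetD_of_nonneg _ _ hr, pyGetD_nonneg g hr,
    PySem.List.pySetD_of_nonneg _ _ hc, pvGetD_set]
  by_cases hA : i = r.toNat ∧ r.toNat < g.length
  · rw [if_pos hA]
    obtain ⟨rfl, hB⟩ := hA
    rw [pvGetD_set]
    by_cases hC : j = c.toNat ∧ c.toNat < (g.getD r.toNat []).length
    · rw [if_pos hC, if_pos ⟨rfl, hC.1, hB, hC.2⟩]
    · rw [if_neg hC, if_neg (by tauto)]
  · rw [if_neg hA, if_neg (by tauto)]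

lemma pvShape_pvSet (g : List (List Int)) {r c : Int} (hr : 0 ≤ r) (hc : 0 ≤ c) (v : Int) :
    pvShape g (pvSet g r c v) := by
  unfold pvSet
  rw [PySem.List.pySetD_of_nonneg _ _ hr, pyGetD_nonneg g hr,
    PySem.List.pySetD_of_nonneg _ _ hc]
  refine ⟨by simp, fun k => ?_⟩
  rw [pvGetD_set]
  split_ifs with h1
  · rw [h1.1, List.length_set]
  · rfl

-- the value written by the inner fill loop 'for c in range(c0, c1): if g[r][c]==bg: g[r][c]=4'
lemma pvFillInner (bg : Int) (r : Int) (hr : 0 ≤ r) :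
    ∀ (n : Nat) (c0 c1 : Int), 0 ≤ c0 → (c1 - c0).toNat = n → ∀ g : List (List Int),
    pvShape g ((PySem.List.pyRange c0 c1 1).foldl
        (fun g c => if pvGet g r c = bg then pvSet g r c 4 else g) g) ∧
    (∀ i j : Nat, pvGetN ((PySem.List.pyRange c0 c1 1).foldl
        (fun g c => if pvGet g r c = bg then pvSet g r c 4 else g) g) i j =
      if (i : Int) = r ∧ c0 ≤ (j : Int) ∧ (j : Int) < c1 ∧ i < g.length ∧
          j < (g.getD i []).length ∧ pvGetN g i j = bg
      then 4 else pvGetN g i j) := by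
  intro n
  induction n with
  | zero =>
    intro c0 c1 hc0 hn g
    have hnil : PySem.List.pyRange c0 c1 1 = [] := PySem.List.pyRange_one_eq_nil (by omega)
    rw [hnil]
    simp only [List.foldl_nil]
    refine ⟨pvShape_refl g, fun i j => ?_⟩
    rw [if_neg (by omega)]
  | succ n ih =>
    intro c0 c1 hc0 hn g
    have hlt : c0 < c1 := by omega
    rw [PySem.List.pyRange_one_cons hlt]
    simp only [List.foldl_cons]
    set g1 := if pvGet g r c0 = bg then pvSet g r c0 4 else g with hg1
    have hshape1 : pvShape g g1 := by
      rw [hg1]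
      split_ifs with hb
      · exact pvShape_pvSet g hr hc0 4
      · exact pvShape_refl g
    have hval1 : ∀ i j : Nat, pvGetN g1 i j =
        if i = r.toNat ∧ j = c0.toNat ∧ i < g.length ∧ j < (g.getD i []).length ∧
            pvGetN g i j = bg
        then 4 else pvGetN g i j := by
      intro i j
      rw [hg1]
      by_cases hb : pvGet g r c0 = bg
      · rw [if_pos hb, pvGetN_pvSet g hr hc0 4 i j]
        rw [pvGet_nonneg g hr hc0] at hb
        have hiff : (i = r.toNat ∧ j = c0.toNat ∧ r.toNat < g.length ∧
            c0.toNat < (g.getD r.toNat []).length) ↔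
            (i = r.toNat ∧ j = c0.toNat ∧ i < g.length ∧ j < (g.getD i []).length ∧
              pvGetN g i j = bg) := by
          constructor
          · rintro ⟨rfl, rfl, e3, e4⟩
            exact ⟨rfl, rfl, e3, e4, hb⟩
          · rintro ⟨rfl, rfl, e3, e4, _⟩
            exact ⟨rfl, rfl, e3, e4⟩
        simp only [hiff]
      · rw [if_neg hb, pvGet_nonneg g hr hc0] at *
        rw [if_neg]
        rintro ⟨rfl, rfl, _, _, e5⟩
        exact hb e5
    obtain ⟨hshape2, hval2⟩ := ih (c0 + 1) c1 (by omega) (by omega) g1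
    refine ⟨pvShape_trans hshape1 hshape2, fun i j => ?_⟩
    rw [hval2 i j]
    have hlen1 : g1.length = g.length := hshape1.1
    have hlen2 : (g1.getD i []).length = (g.getD i []).length := hshape1.2 i
    by_cases hP : ((i : Int) = r ∧ c0 + 1 ≤ (j : Int) ∧ (j : Int) < c1 ∧ i < g1.length ∧
        j < (g1.getD i []).length ∧ pvGetN g1 i j = bg)
    · rw [if_pos hP]
      obtain ⟨e1, e2, e3, e4, e5, e6⟩ := hP
      have hC : ¬(i = r.toNat ∧ j = c0.toNat ∧ i < g.length ∧ j < (g.getD i []).length ∧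
          pvGetN g i j = bg) := by
        rintro ⟨_, e2', _⟩
        omega
      rw [hval1 i j, if_neg hC] at e6
      rw [if_pos (⟨e1, by omega, e3, by omega, by omega, e6⟩ :
        ((i : Int) = r ∧ c0 ≤ (j : Int) ∧ (j : Int) < c1 ∧ i < g.length ∧
          j < (g.getD i []).length ∧ pvGetN g i j = bg))]
    · rw [if_neg hP, hval1 i j]
      by_cases hC : (i = r.toNat ∧ j = c0.toNat ∧ i < g.length ∧ j < (g.getD i []).length ∧
          pvGetN g i j = bg)
      · rw [if_pos hC]
        obtain ⟨e1, e2, e3, e4, e5⟩ := hC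
        rw [if_pos (⟨by omega, by omega, by omega, e3, e4, e5⟩ :
          ((i : Int) = r ∧ c0 ≤ (j : Int) ∧ (j : Int) < c1 ∧ i < g.length ∧
            j < (g.getD i []).length ∧ pvGetN g i j = bg))]
      · rw [if_neg hC, if_neg]
        rintro ⟨e1, e2, e3, e4, e5, e6⟩
        by_cases hj : (j : Int) = c0
        · exact hC ⟨by omega, by omega, e4, e5, e6⟩
        · have hg1v : pvGetN g1 i j = pvGetN g i j := by
            rw [hval1 i j, if_neg hC]
          exact hP ⟨e1, by omega, e3, by omega, by omega, by rw [hg1v]; exact e6⟩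


-- the value written by A's bounding-box double loop
lemma pvFillBox (bg : Int) :
    ∀ (n : Nat) (r0 r1 : Int), 0 ≤ r0 → (r1 - r0).toNat = n →
    ∀ (c0 c1 : Int), 0 ≤ c0 → ∀ g : List (List Int),
    pvShape g ((PySem.List.pyRange r0 r1 1).foldl (fun g r =>
        (PySem.List.pyRange c0 c1 1).foldl
          (fun g c => if pvGet g r c = bg then pvSet g r c 4 else g) g) g) ∧
    (∀ i j : Nat, pvGetN ((PySem.List.pyRange r0 r1 1).foldl (fun g r =>
        (PySem.List.pyRange c0 c1 1).foldl
          (fun g c => if pvGet g r c = bg then pvSet g r c 4 else g) g) g) i j =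
      if r0 ≤ (i : Int) ∧ (i : Int) < r1 ∧ c0 ≤ (j : Int) ∧ (j : Int) < c1 ∧ i < g.length ∧
          j < (g.getD i []).length ∧ pvGetN g i j = bg
      then 4 else pvGetN g i j) := by
  intro n
  induction n with
  | zero =>
    intro r0 r1 hr0 hn c0 c1 hc0 g
    have hnil : PySem.List.pyRange r0 r1 1 = [] := PySem.List.pyRange_one_eq_nil (by omega)
    rw [hnil]
    simp only [List.foldl_nil]
    refine ⟨pvShape_refl g, fun i j => ?_⟩
    rw [if_neg (by omega)]
  | succ n ih =>
    intro r0 r1 hr0 hn c0 c1 hc0 g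
    have hlt : r0 < r1 := by omega
    rw [PySem.List.pyRange_one_cons hlt]
    simp only [List.foldl_cons]
    obtain ⟨hshape1, hval1⟩ := pvFillInner bg r0 hr0 (c1 - c0).toNat c0 c1 hc0 rfl g
    set g1 := (PySem.List.pyRange c0 c1 1).foldl
      (fun g c => if pvGet g r0 c = bg then pvSet g r0 c 4 else g) g with hg1
    obtain ⟨hshape2, hval2⟩ := ih (r0 + 1) r1 (by omega) (by omega) c0 c1 hc0 g1
    refine ⟨pvShape_trans hshape1 hshape2, fun i j => ?_⟩
    rw [hval2 i j]
    have hlen1 : g1.length = g.length := hshape1.1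
    have hlen2 : (g1.getD i []).length = (g.getD i []).length := hshape1.2 i
    by_cases hP : (r0 + 1 ≤ (i : Int) ∧ (i : Int) < r1 ∧ c0 ≤ (j : Int) ∧ (j : Int) < c1 ∧
        i < g1.length ∧ j < (g1.getD i []).length ∧ pvGetN g1 i j = bg)
    · rw [if_pos hP]
      obtain ⟨e1, e2, e3, e4, e5, e6, e7⟩ := hP
      have hC : ¬((i : Int) = r0 ∧ c0 ≤ (j : Int) ∧ (j : Int) < c1 ∧ i < g.length ∧
          j < (g.getD i []).length ∧ pvGetN g i j = bg) := by
        rintro ⟨e1', _⟩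
        omega
      rw [hval1 i j, if_neg hC] at e7
      rw [if_pos (⟨by omega, e2, e3, e4, by omega, by omega, e7⟩ :
        (r0 ≤ (i : Int) ∧ (i : Int) < r1 ∧ c0 ≤ (j : Int) ∧ (j : Int) < c1 ∧ i < g.length ∧
          j < (g.getD i []).length ∧ pvGetN g i j = bg))]
    · rw [if_neg hP, hval1 i j]
      by_cases hC : ((i : Int) = r0 ∧ c0 ≤ (j : Int) ∧ (j : Int) < c1 ∧ i < g.length ∧
          j < (g.getD i []).length ∧ pvGetN g i j = bg)
      · rw [if_pos hC]
        obtain ⟨e1, e2, e3, e4, e5, e6⟩ := hC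
        rw [if_pos (⟨by omega, by omega, e2, e3, e4, e5, e6⟩ :
          (r0 ≤ (i : Int) ∧ (i : Int) < r1 ∧ c0 ≤ (j : Int) ∧ (j : Int) < c1 ∧ i < g.length ∧
            j < (g.getD i []).length ∧ pvGetN g i j = bg))]
      · rw [if_neg hC, if_neg]
        rintro ⟨e1, e2, e3, e4, e5, e6, e7⟩
        by_cases hi : (i : Int) = r0
        · exact hC ⟨hi, e3, e4, e5, e6, e7⟩
        · have hg1v : pvGetN g1 i j = pvGetN g i j := by
            rw [hval1 i j, if_neg hC]
          exact hP ⟨by omega, e2, e3, e4, by omega, by omega, by rw [hg1v]; exact e7⟩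

-- min/max of an Int list depend only on its members
lemma pvMin?_congr (l1 l2 : List Int) (hm : ∀ x, x ∈ l1 ↔ x ∈ l2) : l1.min? = l2.min? := by
  cases h1 : l1.min? with
  | none =>
    rw [List.min?_eq_none_iff] at h1
    subst h1
    cases h2 : l2.min? with
    | none => rfl
    | some b =>
      have hb := (List.min?_eq_some_iff.mp h2).1
      rw [← hm b] at hb
      cases hb
  | some a =>
    obtain ⟨ha, hall⟩ := List.min?_eq_some_iff.mp h1
    symm
    rw [List.min?_eq_some_iff]
    exact ⟨(hm a).mp ha, fun b hb => hall b ((hm b).mpr hb)⟩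

lemma pvMax?_congr (l1 l2 : List Int) (hm : ∀ x, x ∈ l1 ↔ x ∈ l2) : l1.max? = l2.max? := by
  cases h1 : l1.max? with
  | none =>
    rw [List.max?_eq_none_iff] at h1
    subst h1
    cases h2 : l2.max? with
    | none => rfl
    | some b =>
      have hb := (List.max?_eq_some_iff.mp h2).1
      rw [← hm b] at hb
      cases hb
  | some a =>
    obtain ⟨ha, hall⟩ := List.max?_eq_some_iff.mp h1
    symm
    rw [List.max?_eq_some_iff]
    exact ⟨(hm a).mp ha, fun b hb => hall b ((hm b).mpr hb)⟩

lemma pvMap_congr_mem {α β : Type} (f : α → β) (l1 l2 : List α)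
    (hm : ∀ x, x ∈ l1 ↔ x ∈ l2) : ∀ y, y ∈ l1.map f ↔ y ∈ l2.map f := by
  intro y
  simp only [List.mem_map]
  constructor
  · rintro ⟨x, hx, rfl⟩
    exact ⟨x, (hm x).mp hx, rfl⟩
  · rintro ⟨x, hx, rfl⟩
    exact ⟨x, (hm x).mpr hx, rfl⟩

-- Counter keys come from the counted list, and most_common(1) picks one of them
lemma pvCounter_aux (step : PySem.Dict Int Int → Int → PySem.Dict Int Int)
    (hstep : ∀ d v kc, kc ∈ (step d v).items → kc.1 = v ∨ kc ∈ d.items) :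
    ∀ (xs : List Int) (d : PySem.Dict Int Int) kc,
    kc ∈ (xs.foldl step d).items → kc.1 ∈ xs ∨ kc ∈ d.items := by
  intro xs
  induction xs with
  | nil => intro d kc h; exact Or.inr h
  | cons x t ih =>
    intro d kc h
    rcases ih (step d x) kc h with h1 | h1
    · exact Or.inl (List.mem_cons.2 (Or.inr h1))
    · rcases hstep d x kc h1 with h2 | h2
      · exact Or.inl (List.mem_cons.2 (Or.inl h2))
      · exact Or.inr h2

lemma pvInsert_mem (d : PySem.Dict Int Int) (k v : Int) (kc : Int × Int)
    (h : kc ∈ (d.insert k v).items) : kc.1 = k ∨ kc ∈ d.items := by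
  rw [PySem.Dict.insert] at h
  split_ifs at h with hc
  · simp only [List.mem_map] at h
    obtain ⟨p, hp, he⟩ := h
    by_cases hpk : (p.1 == k) = true
    · rw [if_pos hpk] at he
      subst he
      exact Or.inl rfl
    · rw [if_neg hpk] at he
      subst he
      exact Or.inr hp
  · simp only [List.mem_append, List.mem_singleton] at h
    rcases h with h | h
    · exact Or.inr h
    · subst h
      exact Or.inl rfl

lemma pvFoldPick_mem (rest : List (Int × Int)) :
    ∀ kc, (rest.foldl (fun best kc' => if kc'.2 > best.2 then kc' else best) kc) ∈ kc :: rest := by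
  induction rest with
  | nil => intro kc; simp
  | cons x t ih =>
    intro kc
    simp only [List.foldl_cons]
    by_cases hx : x.2 > kc.2
    · rw [if_pos hx]
      exact List.mem_cons_of_mem kc (ih x)
    · rw [if_neg hx]
      rcases List.mem_cons.1 (ih kc) with h1 | h1
      · exact List.mem_cons.2 (Or.inl h1)
      · exact List.mem_cons_of_mem kc (List.mem_cons_of_mem x h1)

lemma pvMostCommon1_mem (xs : List Int) (h : xs ≠ []) : pvMostCommon1 xs ∈ xs := by
  rw [pvMostCommon1]
  cases hi : (pvCounter xs).items with
  | nil =>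
    exfalso
    apply h
    cases xs with
    | nil => rfl
    | cons x t =>
      exfalso
      -- the fold starting from a dict with ≥ 0 items on a cons list has nonempty items
      have hne : ∀ (l : List Int) (d : PySem.Dict Int Int), d.items ≠ [] →
          (l.foldl (fun d v => d.insert v (d.getD v 0 + 1)) d).items ≠ [] := by
        intro l
        induction l with
        | nil => intro d hd; exact hd
        | cons y u ihl =>
          intro d hd
          apply ihl
          simp only [PySem.Dict.insert]
          split_ifs with hc
          · intro hemp
            rw [List.map_eq_nil_iff] at hemp
            rw [hemp] at hd
            exact hd rfl
          · simp
      have h0 : ((x :: t).foldl (fun d v => d.insert v (d.getD v 0 + 1))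
          (PySem.Dict.empty : PySem.Dict Int Int)).items ≠ [] := by
        simp only [List.foldl_cons]
        apply hne
        simp only [PySem.Dict.insert]
        split_ifs with hc
        · simp only [PySem.Dict.empty, PySem.Dict.contains] at hc
          simp at hc
        · simp [PySem.Dict.empty]
      rw [pvCounter] at hi
      exact h0 hi
  | cons kc rest =>
    have hmem := pvFoldPick_mem rest kc
    have hsub : ∀ p ∈ kc :: rest, p.1 ∈ xs := by
      intro p hp
      rw [← hi] at hp
      rcases pvCounter_aux _ (fun d v kc h => pvInsert_mem d v _ kc h) xs (PySem.Dict.empty : PySem.Dict Int Int) p hp with h1 | h1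
      · exact h1
      · rw [PySem.Dict.empty] at h1
        cases h1
    exact hsub _ hmem

-- ---------- instantiating the worklist spec for the two searches ----------
lemma pvClosed_rtg {ok : Int × Int → Bool} {vis : List (Int × Int)}
    (hcl : ∀ p ∈ vis, ∀ q, pvR ok p q → q ∈ vis) {a b : Int × Int}
    (hab : Relation.ReflTransGen (pvR ok) a b) (ha : a ∈ vis) : b ∈ vis := by
  induction hab with
  | refl => exact ha
  | tail _ h2 ih => exact hcl _ ih _ h2

-- finite universe of cells
def pvF (h w : Int) : Finset (Int × Int) :=
  (Finset.range h.toNat ×ˢ Finset.range w.toNat).image (fun p => ((p.1 : Int), (p.2 : Int)))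

lemma pvF_mem (g : List (List Int)) (h w : Int) (p : Int × Int)
    (hok : pvOk g h w p = true) : p ∈ pvF h w := by
  simp only [pvOk, decide_eq_true_eq] at hok
  simp only [pvF, Finset.mem_image, Finset.mem_product, Finset.mem_range]
  exact ⟨(p.1.toNat, p.2.toNat), ⟨by omega, by omega⟩, by
    simp only [Prod.ext_iff]
    constructor <;> simp <;> omega⟩

lemma pvF_card (h w : Int) : (pvF h w).card ≤ h.toNat * w.toNat := by
  calc (pvF h w).card ≤ (Finset.range h.toNat ×ˢ Finset.range w.toNat).card :=
        Finset.card_image_le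
    _ = h.toNat * w.toNat := by rw [Finset.card_product, Finset.card_range, Finset.card_range]

lemma pvFuel_ok (h w : Int) (vis : List (Int × Int)) (s : Int × Int) :
    5 * ((pvF h w).filter (fun p => p ∉ vis)).card + ([s] : List (Int × Int)).length ≤
      5 * (h.toNat * w.toNat) + 1 := by
  have h1 : ((pvF h w).filter (fun p => p ∉ vis)).card ≤ (pvF h w).card :=
    Finset.card_filter_le _ _
  have h2 := pvF_card h w
  simp only [List.length_singleton]
  omega

-- B's BFS from s computes exactly the connected component of s
lemma pvCL_mem (grid : List (List Int)) (h w : Int) (s : Int × Int)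
    (hok : pvOk grid h w s = true) :
    ∀ x, x ∈ pvBfsB grid h w (5 * (h.toNat * w.toNat) + 1) [] [s] [] ↔
      Relation.ReflTransGen (pvR (pvOk grid h w)) s x := by
  intro x
  rw [pvBfsB_eq]
  obtain ⟨_, H1⟩ := pvWl_spec (pvOk grid h w)
    (fun l => match l with | [] => none | x :: xs => some (x, xs))
    (pvF h w) (pvF_mem grid h w)
    (by intro l p rest hp; cases l with
        | nil => cases hp
        | cons a t => simp only at hp; cases hp; exact List.Perm.refl _)
    (by intro l hp; cases l with
        | nil => rfl
        | cons a t => simp at hp)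
    (5 * (h.toNat * w.toNat) + 1) [] [s] []
    (by intro p hp; cases hp)
    (pvFuel_ok h w [] s)
  rw [H1 x]
  simp only [List.not_mem_nil, not_false_iff, true_and, false_or, pvReach,
    List.mem_singleton]
  constructor
  · rintro ⟨s', rfl, _, hr⟩
    exact hr
  · intro hr
    exact ⟨s, rfl, hok, hr⟩

-- A's DFS from an unvisited s, with a closed visited set, computes the same component
lemma pvDfs_call (g grid : List (List Int)) (h w : Int)
    (hok_eq : ∀ p, pvOk g h w p = pvOk grid h w p)
    (vis : List (Int × Int)) (s : Int × Int)
    (hok : pvOk grid h w s = true)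
    (hcl : ∀ p ∈ vis, ∀ q, pvR (pvOk grid h w) p q → q ∈ vis)
    (hs : s ∉ vis) :
    (∀ x, x ∈ (pvDfsA g h w (5 * (h.toNat * w.toNat) + 1) vis [s] []).1 ↔
      Relation.ReflTransGen (pvR (pvOk grid h w)) s x) ∧
    (∀ x, x ∈ (pvDfsA g h w (5 * (h.toNat * w.toNat) + 1) vis [s] []).2 ↔
      x ∈ vis ∨ Relation.ReflTransGen (pvR (pvOk grid h w)) s x) := by
  have hfe : pvOk g h w = pvOk grid h w := funext hok_eq
  obtain ⟨H2, H1⟩ := pvWl_spec (pvOk grid h w)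
    (fun l => l.getLast?.map (fun p => (p, l.dropLast)))
    (pvF h w) (pvF_mem grid h w)
    pvPopLast_perm pvPopLast_none
    (5 * (h.toNat * w.toNat) + 1) vis [s] []
    (fun p hp q hR => Or.inl (hcl p hp q hR))
    (pvFuel_ok h w vis s)
  have hre : ∀ x, pvReach (pvOk grid h w) [s] x ↔
      Relation.ReflTransGen (pvR (pvOk grid h w)) s x := by
    intro x
    constructor
    · rintro ⟨s', hs', _, hr⟩
      rw [List.mem_singleton] at hs'
      subst hs'
      exact hr
    · intro hr
      exact ⟨s, List.mem_singleton.2 rfl, hok, hr⟩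
  constructor
  · intro x
    rw [pvDfsA_eq, hfe, H1 x]
    simp only [List.not_mem_nil, false_or]
    rw [hre x]
    constructor
    · rintro ⟨_, hr⟩
      exact hr
    · intro hr
      refine ⟨fun hx => hs ?_, hr⟩
      exact pvClosed_rtg hcl (pvRtg_symm hr) hx
  · intro x
    rw [pvDfsA_eq, hfe, H2 x, hre x]

-- ---------- bounding boxes and the fill invariant ----------
def pvBox (grid : List (List Int)) (h w : Int) (s : Int × Int) : Int × Int × Int × Int :=
  let comp := pvBfsB grid h w (5 * (h.toNat * w.toNat) + 1) [] [s] []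
  (((comp.map Prod.fst).min?).getD 0, ((comp.map Prod.fst).max?).getD 0,
   ((comp.map Prod.snd).min?).getD 0, ((comp.map Prod.snd).max?).getD 0)

def pvInBox (b : Int × Int × Int × Int) (i j : Nat) : Bool :=
  decide (b.1 ≤ (i : Int) ∧ (i : Int) ≤ b.2.1 ∧ b.2.2.1 ≤ (j : Int) ∧ (j : Int) ≤ b.2.2.2)

def pvFilled (grid : List (List Int)) (h w : Int) (D : List (Int × Int)) (i j : Nat) : Bool :=
  D.any (fun s => pvInBox (pvBox grid h w s) i j)

lemma pvBox_conn (grid : List (List Int)) (h w : Int) {s t : Int × Int}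
    (hs : pvOk grid h w s = true) (ht : pvOk grid h w t = true)
    (hconn : Relation.ReflTransGen (pvR (pvOk grid h w)) s t) :
    pvBox grid h w s = pvBox grid h w t := by
  have hm : ∀ x, x ∈ pvBfsB grid h w (5 * (h.toNat * w.toNat) + 1) [] [s] [] ↔
      x ∈ pvBfsB grid h w (5 * (h.toNat * w.toNat) + 1) [] [t] [] := by
    intro x
    rw [pvCL_mem grid h w s hs, pvCL_mem grid h w t ht]
    constructor
    · intro hx
      exact Relation.ReflTransGen.trans (pvRtg_symm hconn) hx
    · intro hx
      exact Relation.ReflTransGen.trans hconn hx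
  simp only [pvBox]
  rw [pvMin?_congr _ _ (pvMap_congr_mem Prod.fst _ _ hm),
    pvMax?_congr _ _ (pvMap_congr_mem Prod.fst _ _ hm),
    pvMin?_congr _ _ (pvMap_congr_mem Prod.snd _ _ hm),
    pvMax?_congr _ _ (pvMap_congr_mem Prod.snd _ _ hm)]

lemma pvBox_spec (grid : List (List Int)) (h w : Int) (s : Int × Int)
    (hok : pvOk grid h w s = true) :
    0 ≤ (pvBox grid h w s).1 ∧ (pvBox grid h w s).2.1 < h ∧
    0 ≤ (pvBox grid h w s).2.2.1 ∧ (pvBox grid h w s).2.2.2 < w ∧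
    (∀ x, Relation.ReflTransGen (pvR (pvOk grid h w)) s x →
      pvInBox (pvBox grid h w s) x.1.toNat x.2.toNat = true) := by
  simp only [pvBox]
  set comp := pvBfsB grid h w (5 * (h.toNat * w.toNat) + 1) [] [s] [] with hcomp
  have hsm : s ∈ comp := (pvCL_mem grid h w s hok s).mpr Relation.ReflTransGen.refl
  have hbnd : ∀ x ∈ comp, 0 ≤ x.1 ∧ x.1 < h ∧ 0 ≤ x.2 ∧ x.2 < w := by
    intro x hx
    have hr := (pvCL_mem grid h w s hok x).mp hx
    have h2 := pvRtg_ok_right hok hr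
    simp only [pvOk, decide_eq_true_eq] at h2
    exact ⟨h2.1, h2.2.1, h2.2.2.1, h2.2.2.2.1⟩
  cases hmr : (comp.map Prod.fst).min? with
  | none =>
    rw [List.min?_eq_none_iff, List.map_eq_nil_iff] at hmr
    rw [hmr] at hsm
    cases hsm
  | some mr =>
  cases hMr : (comp.map Prod.fst).max? with
  | none =>
    rw [List.max?_eq_none_iff, List.map_eq_nil_iff] at hMr
    rw [hMr] at hsm
    cases hsm
  | some Mr =>
  cases hmc : (comp.map Prod.snd).min? with
  | none =>
    rw [List.min?_eq_none_iff, List.map_eq_nil_iff] at hmc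
    rw [hmc] at hsm
    cases hsm
  | some mc =>
  cases hMc : (comp.map Prod.snd).max? with
  | none =>
    rw [List.max?_eq_none_iff, List.map_eq_nil_iff] at hMc
    rw [hMc] at hsm
    cases hsm
  | some Mc =>
  obtain ⟨hmr1, hmr2⟩ := List.min?_eq_some_iff.mp hmr
  obtain ⟨hMr1, hMr2⟩ := List.max?_eq_some_iff.mp hMr
  obtain ⟨hmc1, hmc2⟩ := List.min?_eq_some_iff.mp hmc
  obtain ⟨hMc1, hMc2⟩ := List.max?_eq_some_iff.mp hMc
  simp only [Option.getD_some]
  obtain ⟨x1, hx1, he1⟩ := List.mem_map.mp hmr1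
  obtain ⟨x2, hx2, he2⟩ := List.mem_map.mp hMr1
  obtain ⟨x3, hx3, he3⟩ := List.mem_map.mp hmc1
  obtain ⟨x4, hx4, he4⟩ := List.mem_map.mp hMc1
  have hb1 := hbnd x1 hx1
  have hb2 := hbnd x2 hx2
  have hb3 := hbnd x3 hx3
  have hb4 := hbnd x4 hx4
  refine ⟨by omega, by omega, by omega, by omega, fun x hx => ?_⟩
  have hxc : x ∈ comp := (pvCL_mem grid h w s hok x).mpr hx
  have hxb := hbnd x hxc
  have i1 := hmr2 x.1 (List.mem_map.mpr ⟨x, hxc, rfl⟩)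
  have i2 := hMr2 x.1 (List.mem_map.mpr ⟨x, hxc, rfl⟩)
  have i3 := hmc2 x.2 (List.mem_map.mpr ⟨x, hxc, rfl⟩)
  have i4 := hMc2 x.2 (List.mem_map.mpr ⟨x, hxc, rfl⟩)
  simp only [pvInBox, decide_eq_true_eq]
  omega

lemma pvGetN_range (g : List (List Int)) (i j : Nat) (h : pvGetN g i j ≠ 0) :
    i < g.length ∧ j < (g.getD i []).length := by
  rcases Nat.lt_or_ge i g.length with h1 | h1
  · rcases Nat.lt_or_ge j (g.getD i []).length with h2 | h2
    · exact ⟨h1, h2⟩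
    · exfalso
      apply h
      rw [pvGetN, List.getD_eq_default _ _ h2]
  · exfalso
    apply h
    rw [pvGetN, List.getD_eq_default _ _ h1]
    simp

lemma pvOk_congr (grid g : List (List Int)) (h w : Int)
    (hval2 : ∀ i j : Nat, (pvGetN g i j = 2 ↔ pvGetN grid i j = 2)) :
    ∀ p, pvOk g h w p = pvOk grid h w p := by
  intro p
  simp only [pvOk, decide_eq_decide]
  constructor
  · rintro ⟨a1, a2, a3, a4, a5⟩
    rw [pvGet_nonneg _ a1 a3] at a5 ⊢
    exact ⟨a1, a2, a3, a4, (hval2 _ _).mp a5⟩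
  · rintro ⟨a1, a2, a3, a4, a5⟩
    rw [pvGet_nonneg _ a1 a3] at a5 ⊢
    exact ⟨a1, a2, a3, a4, (hval2 _ _).mpr a5⟩

-- the loop body of A's pass over `twos` (named for the proofs; `transform` spells it out)
def pvStepA (h w bg : Int) (st : List (List Int) × List (Int × Int)) (s : Int × Int) :
    List (List Int) × List (Int × Int) :=
  if s ∈ st.2 then st else
  let cv := pvDfsA st.1 h w (5 * (h.toNat * w.toNat) + 1) st.2 [s] []
  if cv.1 = [] then (st.1, cv.2) else
  let min_r := ((cv.1.map Prod.fst).min?).getD 0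
  let max_r := ((cv.1.map Prod.fst).max?).getD 0
  let min_c := ((cv.1.map Prod.snd).min?).getD 0
  let max_c := ((cv.1.map Prod.snd).max?).getD 0
  let g' := (PySem.List.pyRange min_r (max_r + 1) 1).foldl (fun g r =>
    (PySem.List.pyRange min_c (max_c + 1) 1).foldl (fun g c =>
      if pvGet g r c = bg then pvSet g r c 4 else g) g) st.1
  (g', cv.2)

lemma pvLoopA (grid : List (List Int)) (h w bg : Int)
    (hbg0 : bg ≠ 0) (hbg2 : bg ≠ 2) :
    ∀ (ts : List (Int × Int)) (g : List (List Int)) (vis D : List (Int × Int)),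
    (∀ s ∈ ts, pvOk grid h w s = true) →
    (∀ s ∈ D, pvOk grid h w s = true) →
    pvShape grid g →
    (∀ i j : Nat, pvGetN g i j =
      if pvGetN grid i j = bg ∧ pvFilled grid h w D i j = true then 4 else pvGetN grid i j) →
    (∀ x, x ∈ vis ↔ ∃ s ∈ D, Relation.ReflTransGen (pvR (pvOk grid h w)) s x) →
    pvShape grid (ts.foldl (pvStepA h w bg) (g, vis)).1 ∧
    (∀ i j : Nat, pvGetN (ts.foldl (pvStepA h w bg) (g, vis)).1 i j =
      if pvGetN grid i j = bg ∧ pvFilled grid h w (D ++ ts) i j = true then 4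
      else pvGetN grid i j) := by
  intro ts
  induction ts with
  | nil =>
    intro g vis D hts hD hsh hval hvis
    simpa using ⟨hsh, hval⟩
  | cons t ts' ih =>
    intro g vis D hts hD hsh hval hvis
    have hokt : pvOk grid h w t = true := hts t (List.mem_cons_self ..)
    have hts' : ∀ s ∈ ts', pvOk grid h w s = true :=
      fun s hs => hts s (List.mem_cons_of_mem t hs)
    have hval2 : ∀ i j : Nat, (pvGetN g i j = 2 ↔ pvGetN grid i j = 2) := by
      intro i j
      rw [hval i j]
      split_ifs with hc
      · constructor
        · intro hh; cases hh
        · intro hh; rw [hh] at hc; exact absurd hc.1.symm hbg2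
      · exact Iff.rfl
    have hcl : ∀ p ∈ vis, ∀ q, pvR (pvOk grid h w) p q → q ∈ vis := by
      intro p hp q hR
      obtain ⟨s0, hs0, hr0⟩ := (hvis p).mp hp
      exact (hvis q).mpr ⟨s0, hs0, hr0.tail hR⟩
    have hDt : ∀ s ∈ D ++ [t], pvOk grid h w s = true := by
      intro s hs
      rcases List.mem_append.1 hs with hs | hs
      · exact hD s hs
      · rw [List.mem_singleton] at hs; subst hs; exact hokt
    simp only [List.foldl_cons]
    by_cases hv : t ∈ vis
    · -- already part of an earlier component: state unchanged, box already counted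
      have hstep : pvStepA h w bg (g, vis) t = (g, vis) := by
        simp only [pvStepA, if_pos hv]
      rw [hstep]
      obtain ⟨s0, hs0, hr0⟩ := (hvis t).mp hv
      have hbox : pvBox grid h w t = pvBox grid h w s0 :=
        (pvBox_conn grid h w (hD s0 hs0) hokt hr0).symm
      have hFsame : ∀ i j : Nat, pvFilled grid h w (D ++ [t]) i j = pvFilled grid h w D i j := by
        intro i j
        rw [pvFilled, pvFilled, List.any_append]
        have h1 : ([t] : List (Int × Int)).any (fun s => pvInBox (pvBox grid h w s) i j) =
            pvInBox (pvBox grid h w t) i j := by simp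
        rw [h1, hbox]
        cases hD0 : (D.any fun s => pvInBox (pvBox grid h w s) i j)
        · simp only [Bool.false_or]
          cases hb : pvInBox (pvBox grid h w s0) i j
          · rfl
          · exfalso
            have : D.any (fun s => pvInBox (pvBox grid h w s) i j) = true :=
              List.any_eq_true.2 ⟨s0, hs0, hb⟩
            rw [hD0] at this; cases this
        · simp
      have hres := ih g vis (D ++ [t]) hts' hDt hsh
        (by intro i j
            rw [hval i j, hFsame i j])
        (by intro x
            rw [hvis x]
            constructor
            · rintro ⟨s', hs', hr⟩
              exact ⟨s', List.mem_append.2 (Or.inl hs'), hr⟩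
            · rintro ⟨s', hs', hr⟩
              rcases List.mem_append.1 hs' with hm | hm
              · exact ⟨s', hm, hr⟩
              · rw [List.mem_singleton] at hm; subst hm
                exact ⟨s0, hs0, hr0.trans hr⟩)
      have hDD : D ++ [t] ++ ts' = D ++ t :: ts' := by simp
      rwa [hDD] at hres
    · -- a fresh component: run the DFS and fill its bounding box
      have hok_eq := pvOk_congr grid g h w hval2
      obtain ⟨hc1, hc2⟩ := pvDfs_call g grid h w hok_eq vis t hokt hcl hv
      have hne : (pvDfsA g h w (5 * (h.toNat * w.toNat) + 1) vis [t] []).1 ≠ [] := by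
        intro hnil
        have := (hc1 t).mpr Relation.ReflTransGen.refl
        rw [hnil] at this
        cases this
      have hmm : ∀ x, x ∈ (pvDfsA g h w (5 * (h.toNat * w.toNat) + 1) vis [t] []).1 ↔
          x ∈ pvBfsB grid h w (5 * (h.toNat * w.toNat) + 1) [] [t] [] := by
        intro x
        rw [hc1 x, pvCL_mem grid h w t hokt]
      have hbx1 : (((pvDfsA g h w (5 * (h.toNat * w.toNat) + 1) vis [t] []).1.map Prod.fst).min?).getD 0 = (pvBox grid h w t).1 := by
        simp only [pvBox]
        rw [pvMin?_congr _ _ (pvMap_congr_mem _ _ _ hmm)]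
      have hbx2 : (((pvDfsA g h w (5 * (h.toNat * w.toNat) + 1) vis [t] []).1.map Prod.fst).max?).getD 0 = (pvBox grid h w t).2.1 := by
        simp only [pvBox]
        rw [pvMax?_congr _ _ (pvMap_congr_mem _ _ _ hmm)]
      have hbx3 : (((pvDfsA g h w (5 * (h.toNat * w.toNat) + 1) vis [t] []).1.map Prod.snd).min?).getD 0 = (pvBox grid h w t).2.2.1 := by
        simp only [pvBox]
        rw [pvMin?_congr _ _ (pvMap_congr_mem _ _ _ hmm)]
      have hbx4 : (((pvDfsA g h w (5 * (h.toNat * w.toNat) + 1) vis [t] []).1.map Prod.snd).max?).getD 0 = (pvBox grid h w t).2.2.2 := by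
        simp only [pvBox]
        rw [pvMax?_congr _ _ (pvMap_congr_mem _ _ _ hmm)]
      have hstep : pvStepA h w bg (g, vis) t =
          ((PySem.List.pyRange (pvBox grid h w t).1 ((pvBox grid h w t).2.1 + 1) 1).foldl
            (fun g r => (PySem.List.pyRange (pvBox grid h w t).2.2.1
                ((pvBox grid h w t).2.2.2 + 1) 1).foldl
              (fun g c => if pvGet g r c = bg then pvSet g r c 4 else g) g) g,
           (pvDfsA g h w (5 * (h.toNat * w.toNat) + 1) vis [t] []).2) := by
        simp only [pvStepA, if_neg hv, if_neg hne, hbx1, hbx2, hbx3, hbx4]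
      rw [hstep]
      obtain ⟨hs1, hs2, hs3, hs4, hs5⟩ := pvBox_spec grid h w t hokt
      obtain ⟨hfs, hfv⟩ := pvFillBox bg (((pvBox grid h w t).2.1 + 1) - (pvBox grid h w t).1).toNat
        (pvBox grid h w t).1 ((pvBox grid h w t).2.1 + 1) hs1 rfl
        (pvBox grid h w t).2.2.1 ((pvBox grid h w t).2.2.2 + 1) hs3 g
      have hres := ih _ _ (D ++ [t]) hts' hDt (pvShape_trans hsh hfs)
        (by intro i j
            rw [hfv i j, hval i j]
            have hFap : pvFilled grid h w (D ++ [t]) i j = true ↔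
                (pvFilled grid h w D i j = true ∨ pvInBox (pvBox grid h w t) i j = true) := by
              rw [pvFilled, List.any_append, Bool.or_eq_true, pvFilled]
              simp
            have hIBiff : pvInBox (pvBox grid h w t) i j = true ↔
                ((pvBox grid h w t).1 ≤ (i : Int) ∧ (i : Int) ≤ (pvBox grid h w t).2.1 ∧
                 (pvBox grid h w t).2.2.1 ≤ (j : Int) ∧ (j : Int) ≤ (pvBox grid h w t).2.2.2) := by
              rw [pvInBox, decide_eq_true_eq]
            have hlg : g.length = grid.length := hsh.1
            have hlr : (g.getD i []).length = (grid.getD i []).length := hsh.2 i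
            have hrng : pvGetN grid i j = bg →
                i < grid.length ∧ j < (grid.getD i []).length := fun hA =>
              pvGetN_range grid i j (by rw [hA]; exact hbg0)
            split_ifs with h1 h2 h3 h4 h5 h6 h7
            · rfl
            · exact absurd ⟨h1.1, hFap.mpr (Or.inl h1.2)⟩ h3
            · rfl
            · exact absurd ⟨h1.1, hFap.mpr (Or.inl h1.2)⟩ h4
            · rfl
            · obtain ⟨e1, e2, e3, e4, e5, e6, e7⟩ := h5
              exact absurd ⟨e7, hFap.mpr (Or.inr (hIBiff.mpr ⟨e1, by omega, e3, by omega⟩))⟩ h6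
            · obtain ⟨hA, hFt⟩ := h7
              rcases hFap.mp hFt with hFd | hIB
              · exact absurd ⟨hA, hFd⟩ h1
              · obtain ⟨b1, b2, b3, b4⟩ := hIBiff.mp hIB
                obtain ⟨r1, r2⟩ := hrng hA
                exact absurd ⟨b1, by omega, b3, by omega, by omega, by omega, hA⟩ h5
            · rfl)
        (by intro x
            rw [hc2 x]
            constructor
            · rintro (hx | hx)
              · obtain ⟨s', hs', hr⟩ := (hvis x).mp hx
                exact ⟨s', List.mem_append.2 (Or.inl hs'), hr⟩
              · exact ⟨t, List.mem_append.2 (Or.inr (by simp)), hx⟩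
            · rintro ⟨s', hs', hr⟩
              rcases List.mem_append.1 hs' with hm | hm
              · exact Or.inl ((hvis x).mpr ⟨s', hm, hr⟩)
              · rw [List.mem_singleton] at hm; subst hm
                exact Or.inr hr)
      have hDD : D ++ [t] ++ ts' = D ++ t :: ts' := by simp
      rwa [hDD] at hres

-- ---------- matching up the two ports' list expressions ----------
lemma pvRow_take (row : List Int) (w : Int) (h0 : 0 ≤ w) (hle : w.toNat ≤ row.length) :
    (PySem.List.pyRange 0 w 1).map (fun j => PySem.List.pyGetD row j 0) =
      PySem.List.slice row none (some w) := by
  rw [PySem.List.slice_to _ h0, PySem.List.pyRange_one, List.map_map]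
  apply List.ext_getElem
  · simp
    omega
  · intro k hk1 hk2
    simp only [List.getElem_map, List.getElem_range, Function.comp_apply, List.getElem_take]
    have : ((0 : Int) + (k : Int)) = ((k : Nat) : Int) := by omega
    rw [this, PySem.List.pyGetD_natCast]
    simp only [List.length_map, List.length_range] at hk1
    rw [List.getD_eq_getElem row 0 (by omega)]

lemma pvVals_eq (grid : List (List Int)) (w : Int) (h0 : 0 ≤ w)
    (hwr : ∀ row ∈ grid, w.toNat ≤ row.length) :
    (PySem.List.pyRange 0 (PySem.List.len grid) 1).flatMap (fun i =>
      ((PySem.List.pyRange 0 w 1).map (fun j => pvGet grid i j)).filter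
        (fun v => !(v == 0 || v == 2))) =
    grid.flatMap (fun row =>
      (PySem.List.slice row none (some w)).filter (fun v => !(v == 0 || v == 2))) := by
  rw [List.flatMap_def, List.flatMap_def]
  congr 1
  have h1 : (PySem.List.pyRange 0 (PySem.List.len grid) 1).map (fun i =>
      ((PySem.List.pyRange 0 w 1).map (fun j => pvGet grid i j)).filter
        (fun v => !(v == 0 || v == 2))) =
      ((PySem.List.pyRange 0 (PySem.List.len grid) 1).map
        (fun i => PySem.List.pyGetD grid i [])).map (fun row =>
          ((PySem.List.pyRange 0 w 1).map (fun j => PySem.List.pyGetD row j 0)).filter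
            (fun v => !(v == 0 || v == 2))) := by
    rw [List.map_map]
    rfl
  rw [h1, PySem.List.map_pyGetD_pyRange_zero]
  apply List.map_congr_left
  intro row hrow
  rw [pvRow_take row w h0 (hwr row hrow)]

lemma pvTwos_ok (grid : List (List Int)) (h w : Int) (s : Int × Int)
    (hs : s ∈ (PySem.List.pyRange 0 h 1).flatMap (fun i =>
      ((PySem.List.pyRange 0 w 1).filter (fun j => pvGet grid i j == 2)).map
        (fun j => (i, j)))) :
    pvOk grid h w s = true := by
  simp only [List.mem_flatMap, List.mem_map, List.mem_filter,
    PySem.List.mem_pyRange_one, beq_iff_eq] at hs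
  obtain ⟨i, ⟨hi1, hi2⟩, j, ⟨⟨hj1, hj2⟩, hj3⟩, rfl⟩ := hs
  simp only [pvOk, decide_eq_true_eq]
  exact ⟨hi1, hi2, hj1, hj2, hj3⟩

lemma pvBoxes_mem (grid : List (List Int)) (h w : Int) (twos : List (Int × Int)) :
    ∀ (acc : PySem.Set (Int × Int × Int × Int)) (b : Int × Int × Int × Int),
    b ∈ twos.foldl (fun bs s => PySem.Set.add bs (pvBox grid h w s)) acc ↔
      b ∈ acc ∨ ∃ s ∈ twos, b = pvBox grid h w s := by
  induction twos with
  | nil => intro acc b; simp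
  | cons t ts ih =>
    intro acc b
    simp only [List.foldl_cons]
    rw [ih]
    rw [PySem.Set.mem_add]
    constructor
    · rintro ((hb | hb) | hb)
      · exact Or.inl hb
      · exact Or.inr ⟨t, List.mem_cons_self .., hb⟩
      · obtain ⟨s', hs', rfl⟩ := hb
        exact Or.inr ⟨s', List.mem_cons_of_mem t hs', rfl⟩
    · rintro (hb | ⟨s', hs', rfl⟩)
      · exact Or.inl (Or.inl hb)
      · rcases List.mem_cons.1 hs' with rfl | hm
        · exact Or.inl (Or.inr rfl)
        · exact Or.inr ⟨s', hm, rfl⟩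

lemma pvVals_pred (grid : List (List Int)) (w : Int) (v : Int)
    (hv : v ∈ grid.flatMap (fun row =>
      (PySem.List.slice row none (some w)).filter (fun v => !(v == 0 || v == 2)))) :
    v ≠ 0 ∧ v ≠ 2 := by
  simp only [List.mem_flatMap, List.mem_filter] at hv
  obtain ⟨row, _, _, hp⟩ := hv
  constructor <;> intro hh <;> subst hh <;> simp at hp

lemma pvTransform_eq (grid : List (List Int)) (hne : grid ≠ [])
    (hrow : ∀ row ∈ grid, (grid.headI).length ≤ row.length) :
    transform grid = transform_alt grid := by
  have hg0 : grid.map (fun row => PySem.List.slice row none none) = grid := by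
    simp [PySem.List.slice_none_none]
  have hhead : PySem.List.pyGetD grid 0 [] = grid.headI := by
    rw [PySem.List.pyGetD_zero]
    cases grid with
    | nil => exact absurd rfl hne
    | cons a t => rfl
  have h0w : (0 : Int) ≤ PySem.List.len (PySem.List.pyGetD grid 0 []) := by
    rw [PySem.List.len_eq]
    exact Int.natCast_nonneg _
  have hwr' : ∀ row ∈ grid, (PySem.List.len (PySem.List.pyGetD grid 0 [])).toNat ≤ row.length := by
    intro row hr
    rw [hhead, PySem.List.len_eq]
    have := hrow row hr
    omega
  have hVals := pvVals_eq grid (PySem.List.len (PySem.List.pyGetD grid 0 [])) h0w hwr'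
  rw [transform, transform_alt, hg0, hVals]
  set wI := PySem.List.len (PySem.List.pyGetD grid 0 []) with hwI
  set hI := PySem.List.len grid with hhI
  set vals := grid.flatMap (fun row =>
    (PySem.List.slice row none (some wI)).filter (fun v => !(v == 0 || v == 2))) with hvals
  by_cases hA : vals = []
  · rw [if_pos hA, if_pos hA]
  · rw [if_neg hA, if_neg hA]
    set bg := pvMostCommon1 vals with hbgdef
    set twos := (PySem.List.pyRange 0 hI 1).flatMap (fun i =>
      ((PySem.List.pyRange 0 wI 1).filter (fun j => pvGet grid i j == 2)).map
        (fun j => (i, j))) with htwos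
    by_cases hT : twos = []
    · rw [if_pos hT, if_pos hT]
    · rw [if_neg hT, if_neg hT]
      show (List.foldl (pvStepA hI wI bg) (grid, []) twos).1 =
        (PySem.List.enumerate grid).map (fun iv =>
          (PySem.List.enumerate iv.2).map (fun jv =>
            if jv.2 == bg && ((List.foldl (fun bs s => PySem.Set.add bs (pvBox grid hI wI s))
                [] twos).any (fun b =>
              b.1 ≤ iv.1 && iv.1 ≤ b.2.1 && b.2.2.1 ≤ jv.1 && jv.1 ≤ b.2.2.2))
            then 4 else jv.2))
      have hbgmem : bg ∈ vals := pvMostCommon1_mem vals hA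
      obtain ⟨hbg0, hbg2⟩ := pvVals_pred grid wI bg hbgmem
      have hts : ∀ s ∈ twos, pvOk grid hI wI s = true := fun s hs =>
        pvTwos_ok grid hI wI s hs
      obtain ⟨hshape, hval⟩ := pvLoopA grid hI wI bg hbg0 hbg2 twos grid [] []
        hts (by simp) (pvShape_refl grid)
        (by intro i j
            rw [if_neg]
            rintro ⟨_, hf⟩
            rw [pvFilled] at hf
            simp at hf)
        (by intro x; simp)
      rw [List.nil_append] at hval
      have hany : ∀ (i j : Nat),
          ((List.foldl (fun bs s => PySem.Set.add bs (pvBox grid hI wI s)) [] twos).any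
            (fun b => b.1 ≤ (i : Int) && (i : Int) ≤ b.2.1 &&
              b.2.2.1 ≤ (j : Int) && (j : Int) ≤ b.2.2.2))
          = pvFilled grid hI wI twos i j := by
        intro i j
        apply Bool.eq_iff_iff.mpr
        rw [List.any_eq_true, pvFilled, List.any_eq_true]
        constructor
        · rintro ⟨b, hb, hPb⟩
          rcases (pvBoxes_mem grid hI wI twos [] b).mp hb with hc | ⟨s', hs', rfl⟩
          · cases hc
          · refine ⟨s', hs', ?_⟩
            simp only [Bool.and_eq_true, decide_eq_true_eq] at hPb
            rw [pvInBox, decide_eq_true_eq]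
            tauto
        · rintro ⟨s', hs', hPs⟩
          refine ⟨pvBox grid hI wI s', (pvBoxes_mem grid hI wI twos [] _).mpr
            (Or.inr ⟨s', hs', rfl⟩), ?_⟩
          rw [pvInBox, decide_eq_true_eq] at hPs
          simp only [Bool.and_eq_true, decide_eq_true_eq]
          tauto
      apply List.ext_getElem
      · rw [hshape.1]
        simp [PySem.List.length_enumerate]
      · intro i hi1 hi2
        have hi : i < grid.length := by rwa [hshape.1] at hi1
        simp only [List.getElem_map, PySem.List.getElem_enumerate, zero_add]
        apply List.ext_getElem
        · have := hshape.2 i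
          rw [List.getD_eq_getElem _ [] hi1, List.getD_eq_getElem _ [] hi] at this
          simp only [List.length_map, PySem.List.length_enumerate]
          exact this
        · intro j hj1 hj2
          simp only [List.getElem_map, PySem.List.getElem_enumerate, zero_add]
          have hjg : j < (grid[i]).length := by
            simpa [PySem.List.length_enumerate] using hj2
          have hv := hval i j
          rw [pvGetN, pvGetN, List.getD_eq_getElem _ [] hi1,
            List.getD_eq_getElem _ [] hi,
            List.getD_eq_getElem _ 0 hj1,
            List.getD_eq_getElem _ (0 : Int) hjg] at hv
          rw [hv, hany i j]
          apply if_congr _ rfl rfl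
          rw [Bool.and_eq_true, beq_iff_eq]

theorem transform_spec : Claim_equal_transform := by
  intro grid hdom hpre
  unfold Spec_transform
  exact pvTransform_eq grid hpre.1 hpre.2
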